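-- pv_equiv track=rewrite | github.com/epstabler/star | python/mgstarckyp.py | smc_merge
-- ===== SOURCE A (Python) =====
-- def smc_merge(m1, m2, more):
--     new = m1.copy()
--     for (f,val) in list(m2.items())+more:
--         if not (f[0] in new.keys()):
--             new[f[0]]=val
--         else:
--             return(False,{})
--     return(True, new)
-- ===== SOURCE B (Python) =====
-- def smc_merge(m1, m2, more):
--     items = list(m2.items()) + more
--     keys = [f[0] for (f, val) in items]
--     if len(set(list(m1) + keys)) == len(m1) + len(keys):
--         merged = dict(m1)
--         merged.update({f[0]: val for (f, val) in items})
--         return (True, merged)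
--     return (False, {})
-- ===== Notes on version B (the rewrite author's own statement) =====
-- stated objective: alternative
-- what changed: Replaces A's incremental insert-with-membership-check loop (which short-circuits at the first collision) by a gather-keys / global set-cardinality uniqueness test followed by a bulk dict construction.
import Mathlib
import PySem

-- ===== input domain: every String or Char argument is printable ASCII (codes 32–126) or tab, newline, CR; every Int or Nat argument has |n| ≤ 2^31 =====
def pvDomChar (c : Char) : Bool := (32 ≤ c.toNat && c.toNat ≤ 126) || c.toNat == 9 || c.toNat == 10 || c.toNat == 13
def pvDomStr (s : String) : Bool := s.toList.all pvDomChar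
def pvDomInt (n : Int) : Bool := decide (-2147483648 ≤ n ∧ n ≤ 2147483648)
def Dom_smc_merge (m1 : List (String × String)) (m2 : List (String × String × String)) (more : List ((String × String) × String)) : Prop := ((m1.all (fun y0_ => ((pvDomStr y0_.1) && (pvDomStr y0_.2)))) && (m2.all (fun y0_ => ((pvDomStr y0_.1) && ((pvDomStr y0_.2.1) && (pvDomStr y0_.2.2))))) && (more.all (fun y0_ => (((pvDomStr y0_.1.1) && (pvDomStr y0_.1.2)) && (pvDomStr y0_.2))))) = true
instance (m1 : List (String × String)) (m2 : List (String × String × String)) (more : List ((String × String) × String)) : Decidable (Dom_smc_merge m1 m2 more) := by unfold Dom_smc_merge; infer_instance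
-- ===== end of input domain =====

-- B replaces A's per-item membership-check-and-insert loop by a global key-uniqueness test
-- via set cardinality followed by a bulk dict construction (objective: alternative decomposition).

-- ===== PORT A =====
-- the for-loop of A: insert each (f, val) unless f[0] already a key, else return (False, {})
def smcGoA (new : PySem.Dict String String) : List ((String × String) × String) → Bool × (List (String × String))
  | [] => (true, new.items)
  | (f, v) :: rest =>
      if !(new.contains f.1) then smcGoA (new.insert f.1 v) rest
      else (false, [])

def smc_merge (m1 : List (String × String)) (m2 : List (String × String × String)) (more : List ((String × String) × String)) : Bool × (List (String × String)) :=
  -- the dict arguments arrive as assoc lists; PySem.Dict.ofList is the Python dict they denote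
  let new := PySem.Dict.ofList m1
  let d2 := PySem.Dict.ofList (m2.map (fun p => ((p.1, p.2.1), p.2.2)))
  smcGoA new (d2.items ++ more)

-- ===== PORT B =====
def smc_merge_alt (m1 : List (String × String)) (m2 : List (String × String × String)) (more : List ((String × String) × String)) : Bool × (List (String × String)) :=
  let d1 := PySem.Dict.ofList m1
  let d2 := PySem.Dict.ofList (m2.map (fun p => ((p.1, p.2.1), p.2.2)))
  let items := d2.items ++ more
  let keys := items.map (fun p => p.1.1)
  if (PySem.Set.ofList (d1.keys ++ keys)).length = d1.size + keys.length then
    let merged := d1.update ((PySem.Dict.ofList (items.map (fun p => (p.1.1, p.2)))).items)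
    (true, merged.items)
  else (false, [])

-- ===== PRECONDITION & SPEC =====
def Spec_smc_merge (m1 : List (String × String)) (m2 : List (String × String × String)) (more : List ((String × String) × String)) (out : Bool × (List (String × String))) : Prop := out = smc_merge_alt m1 m2 more
instance (m1 : List (String × String)) (m2 : List (String × String × String)) (more : List ((String × String) × String)) (out : Bool × (List (String × String))) : Decidable (Spec_smc_merge m1 m2 more out) := by unfold Spec_smc_merge; infer_instance

-- ===== CLAIM (what is proved, stated in full; the proofs are below) =====
def Claim_equal_smc_merge : Prop := ∀ (m1 : List (String × String)) (m2 : List (String × String × String)) (more : List ((String × String) × String)), Dom_smc_merge m1 m2 more → Spec_smc_merge m1 m2 more (smc_merge m1 m2 more)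

-- ===== LEMMAS AND PROOFS =====

-- |set(l)| = |l| exactly when l has no duplicates
theorem length_ofList_eq_iff {α : Type} [BEq α] [LawfulBEq α] (l : List α) :
    (PySem.Set.ofList l).length = l.length ↔ l.Nodup := by
  induction l using List.reverseRecOn with
  | nil => simp [PySem.Set.ofList_nil]
  | append_singleton xs x ih =>
      rw [PySem.Set.ofList_append_singleton]
      by_cases hx : x ∈ xs
      · have hmem : x ∈ PySem.Set.ofList xs := (PySem.Set.mem_ofList xs x).mpr hx
        rw [PySem.Set.add_of_mem hmem]
        have hle := PySem.Set.length_ofList_le (xs := xs)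
        simp only [List.length_append, List.length_singleton]
        constructor
        · intro h; omega
        · intro h
          rw [List.nodup_append] at h
          exact absurd rfl (h.2.2 x hx x (by simp))
      · have hmem : x ∉ PySem.Set.ofList xs := fun h => hx ((PySem.Set.mem_ofList xs x).mp h)
        rw [PySem.Set.add_of_not_mem hmem]
        simp only [List.length_append, List.length_singleton]
        rw [List.nodup_append]
        constructor
        · intro h
          have hnd := ih.mp (by omega)
          exact ⟨hnd, List.nodup_singleton x, by intro a ha b hb; simp at hb; subst hb; exact fun he => hx (he ▸ ha)⟩
        · rintro ⟨h1, _, _⟩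
          have := ih.mpr h1
          omega

-- characterisation of A's loop: success iff the seen keys together with the incoming keys are all distinct
theorem smcGoA_spec (items : List ((String × String) × String)) (d : PySem.Dict String String)
    (hd : d.keys.Nodup) :
    smcGoA d items =
      if (d.keys ++ items.map (fun p => p.1.1)).Nodup
      then (true, (d.update (items.map (fun p => (p.1.1, p.2)))).items)
      else (false, []) := by
  induction items generalizing d with
  | nil => simp [smcGoA, PySem.Dict.update, hd]
  | cons p rest ih =>
      obtain ⟨f, v⟩ := p
      simp only [List.map_cons]
      by_cases hc : d.contains f.1 = true
      · have hmem : f.1 ∈ d.keys := (PySem.Dict.contains_iff_mem_keys d f.1).mp hc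
        have hnot : ¬ (d.keys ++ f.1 :: rest.map (fun p => p.1.1)).Nodup := by
          intro h
          rw [List.nodup_append] at h
          exact h.2.2 f.1 hmem f.1 (by simp) rfl
        rw [if_neg hnot]
        simp [smcGoA, hc]
      · have hc' : d.contains f.1 = false := by simpa using hc
        have hkeys : (d.insert f.1 v).keys = d.keys ++ [f.1] :=
          PySem.Dict.keys_insert_of_not_contains (d := d) (k := f.1) (v := v) hc'
        have hfnm : f.1 ∉ d.keys := fun h => hc ((PySem.Dict.contains_iff_mem_keys d f.1).mpr h)
        have hd' : (d.insert f.1 v).keys.Nodup := by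
          rw [hkeys, List.nodup_append]
          exact ⟨hd, List.nodup_singleton _, by intro a ha b hb; simp at hb; subst hb; exact fun he => hfnm (he ▸ ha)⟩
        have heq : (d.insert f.1 v).keys ++ rest.map (fun p => p.1.1)
            = d.keys ++ f.1 :: rest.map (fun p => p.1.1) := by
          rw [hkeys]; simp
        have hupd : (d.insert f.1 v).update (rest.map (fun p => (p.1.1, p.2)))
            = d.update (((f, v) :: rest).map (fun p => (p.1.1, p.2))) := by
          simp [PySem.Dict.update]
        have hstep : smcGoA d ((f, v) :: rest) = smcGoA (d.insert f.1 v) rest := by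
          simp [smcGoA, hc']
        rw [hstep, ih _ hd', heq, hupd]
        simp

-- ===== VERDICT (by name: the statement is the Claim_ definition above) =====
theorem smc_merge_spec : Claim_equal_smc_merge := by
  intro m1 m2 more _
  unfold Spec_smc_merge smc_merge smc_merge_alt
  set d1 := PySem.Dict.ofList m1 with hd1def
  set items := (PySem.Dict.ofList (m2.map (fun p => ((p.1, p.2.1), p.2.2)))).items ++ more with hitems
  have hd1 : d1.keys.Nodup := PySem.Dict.nodup_keys_ofList m1
  rw [smcGoA_spec items d1 hd1]
  have hsize : d1.size = d1.keys.length := by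
    simp [PySem.Dict.size, PySem.Dict.keys]
  have hlen : ((PySem.Set.ofList (d1.keys ++ items.map (fun p => p.1.1))).length
      = d1.size + (items.map (fun p => p.1.1)).length)
      ↔ (d1.keys ++ items.map (fun p => p.1.1)).Nodup := by
    rw [hsize]
    have := length_ofList_eq_iff (d1.keys ++ items.map (fun p => p.1.1))
    simpa [List.length_append] using this
  by_cases hn : (d1.keys ++ items.map (fun p => p.1.1)).Nodup
  · rw [if_pos hn, if_pos (hlen.mpr hn)]
    -- in the success case the comprehension dict's items list is the pairs list itself
    have hkn : ((items.map (fun p => (p.1.1, p.2))).map Prod.fst).Nodup := by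
      have h2 := (List.nodup_append.mp hn).2.1
      simpa [List.map_map, Function.comp] using h2
    have hfresh : ∀ a ∈ items.map (fun p => (p.1.1, p.2)),
        (PySem.Dict.empty : PySem.Dict String String).contains a.1 = false := by
      intro a _; simp [PySem.Dict.contains_empty]
    have hitemsOf : (PySem.Dict.ofList (items.map (fun p => (p.1.1, p.2)))).items
        = items.map (fun p => (p.1.1, p.2)) := by
      have := PySem.Dict.items_foldl_insert_fresh
        (l := items.map (fun p => (p.1.1, p.2))) (k := Prod.fst) (v := Prod.snd)
        (d := PySem.Dict.empty) hfresh hkn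
      simpa [PySem.Dict.ofList, PySem.Dict.update] using this
    rw [hitemsOf]
  · rw [if_neg hn, if_neg (fun h => hn (hlen.mp h))]
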